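-- pv_equiv track=rewrite | github.com/Turbo31150/turbo | finetuning/merge_all.py | is_jarvis_specific
-- ===== SOURCE A (Python) =====
-- def is_jarvis_specific(example: dict) -> bool:
--     """Determine si un exemple est specifique a JARVIS ou generique.
--
--     Ne regarde QUE le contenu user/assistant (pas le system prompt,
--     car tous les exemples ont le meme system prompt JARVIS).
--     """
--     messages = example.get("messages", [])
--
--     # Mots-cles JARVIS dans le contenu user/assistant uniquement
--     jarvis_keywords = [
--         "jarvis", "lm studio", "ollama", "cluster", "gpu", "vram",
--         "trading", "mexc", "crypto", "pipeline", "vocal", "whisper",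
--         "powershell", "commande", "script", "launcher", "modele ia",
--         "qwen", "deepseek", "telegram", "mcp", "tool_call",
--         "<thinking>", "j'ouvre", "j'execute", "je lance",
--         "navigateur", "raccourci", "notification", "scan",
--         "sniper", "monitor", "trident", "bitcoin", "ethereum",
--     ]
--
--     for msg in messages:
--         if msg.get("role") in ("user", "assistant"):
--             content = msg.get("content", "").lower()
--             for kw in jarvis_keywords:
--                 if kw in content:
--                     return True
--
--     return False
-- ===== SOURCE B (Python) =====
-- # B: flatten all lowered user/assistant contents into ONE haystack string,
-- # NUL-separated ("\x00" occurs in no keyword, so no match can cross a message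
-- # boundary), then probe each keyword once against that single string.
-- JARVIS_KEYWORDS = [
--     "jarvis", "lm studio", "ollama", "cluster", "gpu", "vram",
--     "trading", "mexc", "crypto", "pipeline", "vocal", "whisper",
--     "powershell", "commande", "script", "launcher", "modele ia",
--     "qwen", "deepseek", "telegram", "mcp", "tool_call",
--     "<thinking>", "j'ouvre", "j'execute", "je lance",
--     "navigateur", "raccourci", "notification", "scan",
--     "sniper", "monitor", "trident", "bitcoin", "ethereum",
-- ]
--
--
-- def is_jarvis_specific(example: dict) -> bool:
--     haystack = "\x00".join(
--         msg.get("content", "").lower()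
--         for msg in example.get("messages", [])
--         if msg.get("role") in ("user", "assistant")
--     )
--     return any(kw in haystack for kw in JARVIS_KEYWORDS)
-- ===== Notes on version B (the rewrite author's own statement) =====
-- stated objective: alternative
-- what changed: B concatenates all lowered user/assistant contents into one NUL-separated haystack string (the sentinel occurs in no keyword, so matches cannot cross message boundaries) and then tests each keyword once against that single string, eliminating A's per-message inner keyword loop.
import Mathlib
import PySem

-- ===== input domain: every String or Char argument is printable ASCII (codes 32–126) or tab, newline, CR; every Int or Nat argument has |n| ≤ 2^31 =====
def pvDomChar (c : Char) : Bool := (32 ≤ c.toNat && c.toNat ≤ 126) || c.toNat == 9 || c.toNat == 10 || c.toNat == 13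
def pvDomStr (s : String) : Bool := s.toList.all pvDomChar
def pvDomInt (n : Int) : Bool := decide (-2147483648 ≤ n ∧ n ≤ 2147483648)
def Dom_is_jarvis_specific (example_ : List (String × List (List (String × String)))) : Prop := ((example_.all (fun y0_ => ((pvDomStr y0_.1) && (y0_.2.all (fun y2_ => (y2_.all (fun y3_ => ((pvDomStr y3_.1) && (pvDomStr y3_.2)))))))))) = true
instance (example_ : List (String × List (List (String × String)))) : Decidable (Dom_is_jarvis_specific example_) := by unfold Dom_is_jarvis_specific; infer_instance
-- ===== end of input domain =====

-- B flattens all lowered user/assistant contents into ONE NUL-separated haystack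
-- string and probes each keyword once against it (the NUL sentinel occurs in no
-- keyword, so no match crosses a message boundary); same asymptotic cost as A.

-- ===== PORT A =====
def jarvisKeywordsA : List String :=
  ["jarvis", "lm studio", "ollama", "cluster", "gpu", "vram",
   "trading", "mexc", "crypto", "pipeline", "vocal", "whisper",
   "powershell", "commande", "script", "launcher", "modele ia",
   "qwen", "deepseek", "telegram", "mcp", "tool_call",
   "<thinking>", "j'ouvre", "j'execute", "je lance",
   "navigateur", "raccourci", "notification", "scan",
   "sniper", "monitor", "trident", "bitcoin", "ethereum"]

-- inner `for kw in jarvis_keywords: if kw in content: return True`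
def aKwLoop (content : String) : List String → Bool
  | [] => false
  | kw :: rest => if PySem.Str.isIn kw content then true else aKwLoop content rest

-- `msg.get("role") in ("user", "assistant")`
def pvRoleOk (msg : PySem.Dict String String) : Bool :=
  match msg.get? "role" with
  | some r => r == "user" || r == "assistant"
  | none => false

-- outer `for msg in messages: …` with early return
def aMsgLoop : List (List (String × String)) → Bool
  | [] => false
  | m :: rest =>
    let msg := PySem.Dict.mk m
    if pvRoleOk msg then
      let content := PySem.Str.lower (msg.getD "content" "")
      if aKwLoop content jarvisKeywordsA then true else aMsgLoop rest
    else aMsgLoop rest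

def is_jarvis_specific (example_ : List (String × List (List (String × String)))) : Bool :=
  let messages := (PySem.Dict.mk example_).getD "messages" []
  aMsgLoop messages

-- ===== PORT B =====
def JARVIS_KEYWORDS : List String :=
  ["jarvis", "lm studio", "ollama", "cluster", "gpu", "vram",
   "trading", "mexc", "crypto", "pipeline", "vocal", "whisper",
   "powershell", "commande", "script", "launcher", "modele ia",
   "qwen", "deepseek", "telegram", "mcp", "tool_call",
   "<thinking>", "j'ouvre", "j'execute", "je lance",
   "navigateur", "raccourci", "notification", "scan",
   "sniper", "monitor", "trident", "bitcoin", "ethereum"]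

def is_jarvis_specific_alt (example_ : List (String × List (List (String × String)))) : Bool :=
  let messages := (PySem.Dict.mk example_).getD "messages" []
  -- "\x00".join(generator over user/assistant messages)
  let haystack := PySem.Str.join "\x00" (messages.filterMap (fun m =>
    let msg := PySem.Dict.mk m
    if pvRoleOk msg then some (PySem.Str.lower (msg.getD "content" "")) else none))
  JARVIS_KEYWORDS.any (fun kw => PySem.Str.isIn kw haystack)

-- ===== PRECONDITION & SPEC =====
def Spec_is_jarvis_specific (example_ : List (String × List (List (String × String)))) (out : Bool) : Prop := out = is_jarvis_specific_alt example_
instance (example_ : List (String × List (List (String × String)))) (out : Bool) : Decidable (Spec_is_jarvis_specific example_ out) := by unfold Spec_is_jarvis_specific; infer_instance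

-- ===== CLAIM (what is proved, stated in full; the proofs are below) =====
def Claim_equal_is_jarvis_specific : Prop := ∀ (example_ : List (String × List (List (String × String)))), Dom_is_jarvis_specific example_ → Spec_is_jarvis_specific example_ (is_jarvis_specific example_)

-- ===== LEMMAS AND PROOFS =====

theorem aKwLoop_eq_any (content : String) (l : List String) :
    aKwLoop content l = l.any (fun kw => PySem.Str.isIn kw content) := by
  induction l with
  | nil => rfl
  | cons kw rest ih =>
    simp only [aKwLoop, List.any_cons, ih]
    split_ifs with h
    · simp only [h, Bool.true_or]
    · simp only [Bool.not_eq_true] at h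
      simp only [h, Bool.false_or]

theorem aMsgLoop_eq_any (msgs : List (List (String × String))) :
    aMsgLoop msgs = msgs.any (fun m =>
      pvRoleOk (PySem.Dict.mk m) &&
        jarvisKeywordsA.any (fun kw =>
          PySem.Str.isIn kw (PySem.Str.lower ((PySem.Dict.mk m).getD "content" "")))) := by
  induction msgs with
  | nil => rfl
  | cons m rest ih =>
    simp only [aMsgLoop, List.any_cons, aKwLoop_eq_any, ih]
    split_ifs with h1 h2
    · simp only [h1, h2, Bool.true_and, Bool.true_or]
    · simp only [Bool.not_eq_true] at h2
      simp only [h1, h2, Bool.true_and, Bool.false_or]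
    · simp only [Bool.not_eq_true] at h1
      simp only [h1, Bool.false_and, Bool.false_or]

-- a prefix of u ++ sep :: v that avoids sep is a prefix of u
theorem prefix_avoid_sep {α : Type} (sep : α) (kw u v : List α)
    (h : kw <+: u ++ sep :: v) (hs : sep ∉ kw) : kw <+: u := by
  induction kw generalizing u with
  | nil => exact List.nil_prefix
  | cons c kw' ih =>
    cases u with
    | nil =>
      rcases h with ⟨t, ht⟩
      simp only [List.nil_append, List.cons_append] at ht
      cases ht
      exact absurd (List.mem_cons_self) hs
    | cons b u' =>
      rcases h with ⟨t, ht⟩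
      simp only [List.cons_append] at ht
      injection ht with h1 h2
      subst h1
      have := ih u' ⟨t, h2⟩ (fun hm => hs (List.mem_cons_of_mem _ hm))
      exact (List.prefix_cons_inj c).mpr this

-- an infix of u ++ sep :: v that is nonempty and avoids sep lies in u or in v
theorem infix_split_sep {α : Type} (sep : α) (kw u v : List α)
    (h : kw <:+: u ++ sep :: v) (hne : kw ≠ []) (hs : sep ∉ kw) :
    kw <:+: u ∨ kw <:+: v := by
  induction u with
  | nil =>
    simp only [List.nil_append] at h
    rcases (List.infix_cons_iff).mp h with hp | hi
    · rcases kw with _ | ⟨c, kw'⟩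
      · exact absurd rfl hne
      · rcases hp with ⟨t, ht⟩
        injection ht with h1 _
        exact absurd (h1 ▸ List.mem_cons_self) hs
    · exact Or.inr hi
  | cons b u' ih =>
    simp only [List.cons_append] at h
    rcases (List.infix_cons_iff).mp h with hp | hi
    · left
      have : kw <+: b :: (u' ++ sep :: v) := hp
      rcases this with ⟨t, ht⟩
      rcases kw with _ | ⟨c, kw'⟩
      · exact absurd rfl hne
      · injection ht with h1 h2
        subst h1
        have h2' : kw' <+: u' ++ sep :: v := ⟨t, h2⟩
        have := prefix_avoid_sep sep kw' u' v h2' (fun hm => hs (List.mem_cons_of_mem _ hm))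
        exact ((List.prefix_cons_inj c).mpr this).isInfix
    · rcases ih hi with h' | h'
      · exact Or.inl (List.infix_cons h')
      · exact Or.inr h'

-- membership in a [sep]-join ↔ membership in one of the parts (kw nonempty, sep-free)
theorem infix_join_iff {sep : Char} {kw : List Char} (parts : List (List Char))
    (hne : kw ≠ []) (hs : sep ∉ kw) :
    kw <:+: PySem.Chars.join [sep] parts ↔ ∃ p ∈ parts, kw <:+: p := by
  induction parts with
  | nil =>
    simp only [PySem.Chars.join_nil, List.not_mem_nil]
    constructor
    · intro h; exact absurd (List.eq_nil_of_infix_nil h) hne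
    · rintro ⟨p, hp, -⟩; exact absurd hp (by simp)
  | cons p ps ih =>
    cases ps with
    | nil =>
      simp only [PySem.Chars.join_singleton, List.mem_singleton]
      constructor
      · intro h; exact ⟨p, rfl, h⟩
      · rintro ⟨q, rfl, h⟩; exact h
    | cons q qs =>
      rw [PySem.Chars.join_cons_cons]
      constructor
      · intro h
        have h' : kw <:+: p ++ sep :: PySem.Chars.join [sep] (q :: qs) := by
          simpa [List.append_assoc] using h
        rcases infix_split_sep sep kw _ _ h' hne hs with h1 | h1
        · exact ⟨p, List.mem_cons_self, h1⟩
        · rcases ih.mp h1 with ⟨r, hr, hkr⟩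
          exact ⟨r, List.mem_cons_of_mem _ hr, hkr⟩
      · rintro ⟨r, hr, hkr⟩
        rcases List.mem_cons.mp hr with rfl | hr'
        · exact hkr.trans ((List.prefix_append r [sep]).isInfix.trans
            (List.prefix_append (r ++ [sep]) (PySem.Chars.join [sep] (q :: qs))).isInfix)
        · have : kw <:+: PySem.Chars.join [sep] (q :: qs) := ih.mpr ⟨r, hr', hkr⟩
          calc kw <:+: PySem.Chars.join [sep] (q :: qs) := this
            _ <:+: p ++ [sep] ++ PySem.Chars.join [sep] (q :: qs) :=
                (List.suffix_append (p ++ [sep]) (PySem.Chars.join [sep] (q :: qs))).isInfix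

-- every keyword is nonempty and NUL-free
theorem keywords_ok : ∀ kw ∈ JARVIS_KEYWORDS, kw.toList ≠ [] ∧ (Char.ofNat 0) ∉ kw.toList := by
  decide

theorem is_jarvis_specific_spec : Claim_equal_is_jarvis_specific := by
  intro example_ _
  unfold Spec_is_jarvis_specific is_jarvis_specific is_jarvis_specific_alt
  rw [aMsgLoop_eq_any, Bool.eq_iff_iff]
  simp only [List.any_eq_true, Bool.and_eq_true]
  show (∃ m ∈ _, _) ↔ (∃ kw ∈ JARVIS_KEYWORDS, _)
  constructor
  · rintro ⟨m, hm, hrole, kw, hkwmem, hin⟩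
    refine ⟨kw, hkwmem, ?_⟩
    rw [PySem.Str.isIn_iff_infix] at hin ⊢
    rw [PySem.Str.toList_join]
    have hok := keywords_ok kw hkwmem
    rw [show ("\x00" : String).toList = [Char.ofNat 0] from rfl]
    rw [infix_join_iff _ hok.1 hok.2]
    refine ⟨(PySem.Str.lower ((PySem.Dict.mk m).getD "content" "")).toList, ?_, hin⟩
    simp only [List.map_filterMap, List.mem_filterMap]
    exact ⟨m, hm, by simp [hrole]⟩
  · rintro ⟨kw, hkwmem, hin⟩
    rw [PySem.Str.isIn_iff_infix, PySem.Str.toList_join,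
        show ("\x00" : String).toList = [Char.ofNat 0] from rfl] at hin
    have hok := keywords_ok kw hkwmem
    rw [infix_join_iff _ hok.1 hok.2] at hin
    rcases hin with ⟨cl, hcl, hkcl⟩
    simp only [List.map_filterMap, List.mem_filterMap] at hcl
    rcases hcl with ⟨m, hm, hsome⟩
    by_cases hrole : pvRoleOk (PySem.Dict.mk m)
    · simp only [hrole, if_pos, Option.map_some] at hsome
      refine ⟨m, hm, hrole, kw, hkwmem, ?_⟩
      rw [PySem.Str.isIn_iff_infix]
      cases hsome
      exact hkcl
    · simp [hrole] at hsome
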